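-- pv_equiv track=rewrite | github.com/benquick123/code-profiling | code/batch-2/vse-naloge-brez-testov/DN5-M-100.py | izloci_besedo
-- ===== SOURCE A (Python) =====
-- def izloci_besedo(beseda):
--     stevec_d = 0
--     stevec_l = 0
--     for i in range(0, len(beseda)):
--         if (beseda[i].isalnum() == False):
--             stevec_l = stevec_l + 1
--         else:
--             break
--
--     for i in range(len(beseda) - 1, 0, -1):
--         if (beseda[i].isalnum() == False):
--             stevec_d = stevec_d + 1
--         else:
--             break
--
--     return beseda[stevec_l:len(beseda) - stevec_d]
-- ===== SOURCE B (Python) =====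
-- def izloci_besedo(beseda):
--     first = None
--     last = None
--     for i, c in enumerate(beseda):
--         if c.isalnum():
--             if first is None:
--                 first = i
--             last = i
--     if first is None:
--         return ""
--     return beseda[first:last + 1]
-- ===== Notes on version B (the rewrite author's own statement) =====
-- stated objective: simpler
-- what changed: Replaces A's two directional break-scans (index loop from the left counting leading non-alnum, index loop from the right counting trailing non-alnum) plus counter arithmetic with a single forward pass over enumerate that records the first and last alphanumeric indices, then one slice (or "" if none).
import Mathlib
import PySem

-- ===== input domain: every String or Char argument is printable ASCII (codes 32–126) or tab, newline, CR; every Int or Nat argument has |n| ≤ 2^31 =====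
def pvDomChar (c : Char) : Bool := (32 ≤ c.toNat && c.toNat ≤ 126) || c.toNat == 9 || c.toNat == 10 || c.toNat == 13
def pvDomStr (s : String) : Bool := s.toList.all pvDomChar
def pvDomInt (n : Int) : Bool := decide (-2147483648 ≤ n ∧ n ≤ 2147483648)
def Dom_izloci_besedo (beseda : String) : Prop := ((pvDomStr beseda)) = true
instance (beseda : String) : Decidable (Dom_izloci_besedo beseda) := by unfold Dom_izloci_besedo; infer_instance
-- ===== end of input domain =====

-- B replaces A's two directional break-scans with a single forward pass recording the
-- first and last alphanumeric indices (objective: simpler; same O(n) cost).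

-- ===== PORT A =====
-- A's two for-loops have the same body (count while the current char is not alnum,
-- break at the first alnum char); pvScan runs that body over the given index list
-- (A's range(0, len, 1) resp. range(len-1, 0, -1)).
def pvScan (cs : List Char) : List Int → Nat
  | [] => 0
  | i :: rest =>
    match PySem.List.pyGet? cs i with
    | some c => if PySem.Chars.isalnum c = false then pvScan cs rest + 1 else 0
    | none => 0

def izloci_besedo (beseda : String) : String :=
  let cs := beseda.toList
  let stevec_l := pvScan cs (PySem.List.pyRange 0 (cs.length : Int) 1)
  let stevec_d := pvScan cs (PySem.List.pyRange ((cs.length : Int) - 1) 0 (-1))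
  String.ofList (PySem.List.slice cs (some (stevec_l : Int)) (some ((cs.length : Int) - (stevec_d : Int))))

-- ===== PORT B =====
def pvStep (acc : Option Int × Option Int) (ic : Int × Char) : Option Int × Option Int :=
  if PySem.Chars.isalnum ic.2 then
    (match acc.1 with | none => some ic.1 | some f => some f, some ic.1)
  else acc

def izloci_besedo_alt (beseda : String) : String :=
  let cs := beseda.toList
  let fl := (PySem.List.enumerate cs 0).foldl pvStep (none, none)
  match fl.1, fl.2 with
  | some f, some l => String.ofList (PySem.List.slice cs (some f) (some (l + 1)))
  | _, _ => ""

-- ===== PRECONDITION & SPEC =====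
def Spec_izloci_besedo (beseda : String) (out : String) : Prop := out = izloci_besedo_alt beseda
instance (beseda : String) (out : String) : Decidable (Spec_izloci_besedo beseda out) := by unfold Spec_izloci_besedo; infer_instance

-- ===== CLAIM (what is proved, stated in full; the proofs are below) =====
def Claim_equal_izloci_besedo : Prop := ∀ (beseda : String), Dom_izloci_besedo beseda → Spec_izloci_besedo beseda (izloci_besedo beseda)

-- ===== LEMMAS AND PROOFS =====
-- pvP c is "c is NOT alphanumeric" (the predicate both scans strip)
def pvP (c : Char) : Bool := !PySem.Chars.isalnum c

-- takeWhile stops strictly inside l when some element fails p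
theorem pv_tw_lt {p : Char → Bool} {l : List Char} (h : ∃ c ∈ l, p c = false) :
    (l.takeWhile p).length < l.length := by
  rcases Nat.lt_or_ge (l.takeWhile p).length l.length with h1 | h1
  · exact h1
  · exfalso
    have hle := (l.takeWhile_sublist (p := p)).length_le
    have heq : l.takeWhile p = l := (l.takeWhile_sublist (p := p)).eq_of_length (le_antisymm hle h1)
    rcases h with ⟨c, hc, hpc⟩
    have := (List.takeWhile_eq_self_iff.mp heq) c hc
    simp [this] at hpc

theorem pv_tw_stop {p : Char → Bool} {l1 l2 : List Char} (h : ∃ c ∈ l1, p c = false) :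
    (l1 ++ l2).takeWhile p = l1.takeWhile p := by
  rw [List.takeWhile_append, if_neg (Nat.ne_of_lt (pv_tw_lt h))]

theorem pvScan_left (suf pre : List Char) :
    pvScan (pre ++ suf) (PySem.List.pyRange (pre.length : Int) ((pre ++ suf).length : Int) 1)
      = (suf.takeWhile pvP).length := by
  induction suf generalizing pre with
  | nil => simp [PySem.List.pyRange_one_eq_nil, pvScan]
  | cons c t ih =>
    rw [PySem.List.pyRange_one_cons (by simp), pvScan, PySem.List.pyGet?_natCast]
    rw [List.getElem?_append_right (le_refl _)]
    simp only [Nat.sub_self, List.getElem?_cons_zero]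
    by_cases hal : PySem.Chars.isalnum c
    · simp [hal, pvP]
    · have h1 : ((pre.length : Int) + 1) = ((pre ++ [c]).length : Int) := by simp
      have h2 : pre ++ c :: t = (pre ++ [c]) ++ t := by simp
      rw [if_pos (by simp [hal])]
      rw [h2, h1, ih (pre ++ [c])]
      simp [pvP, hal]

theorem pvScan_right (front back : List Char) :
    pvScan (front ++ back) (PySem.List.pyRange ((front.length : Int) - 1) 0 (-1))
      = (front.tail.reverse.takeWhile pvP).length := by
  induction front using List.reverseRecOn generalizing back with
  | nil => simp [PySem.List.pyRange_neg_one_eq_nil, pvScan]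
  | append_singleton front' c ih =>
    rcases front' with _ | ⟨c0, t0⟩
    · simp [PySem.List.pyRange_neg_one_eq_nil, pvScan]
    · have hlen : 0 < ((((c0 :: t0) ++ [c]).length : Int) - 1) := by simp
      rw [PySem.List.pyRange_neg_one_cons (by omega), pvScan]
      have hidx : ((((c0 :: t0) ++ [c]).length : Int) - 1) = ((c0 :: t0).length : Int) := by
        simp
      rw [hidx, List.append_assoc, PySem.List.pyGet?_natCast,
        List.getElem?_append_right (le_refl _)]
      simp only [Nat.sub_self, List.singleton_append, List.getElem?_cons_zero]
      by_cases hal : PySem.Chars.isalnum c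
      · simp [hal, pvP]
      · rw [if_pos (by simp [hal])]
        rw [show c0 :: t0 ++ (c :: back) = (c0 :: t0) ++ (c :: back) from rfl, ih (c :: back)]
        simp [pvP, hal, ]

theorem pvFold (cs : List Char) (k : Int) (acc : Option Int × Option Int) :
    (PySem.List.enumerate cs k).foldl pvStep acc =
      if cs.any PySem.Chars.isalnum then
        ((match acc.1 with
          | none => some (k + ((cs.takeWhile pvP).length : Int))
          | some f => some f),
         some (k + ((cs.length : Int) - 1 - ((cs.reverse.takeWhile pvP).length : Int))))
      else acc := by
  induction cs generalizing k acc with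
  | nil => simp [PySem.List.enumerate_nil]
  | cons c t ih =>
    rw [PySem.List.enumerate_cons, List.foldl_cons, ih]
    by_cases hal : PySem.Chars.isalnum c
    · by_cases hany : t.any PySem.Chars.isalnum
      · rw [if_pos hany, if_pos (by simp [hal])]
        have hstop : ((t.reverse ++ [c]).takeWhile pvP) = t.reverse.takeWhile pvP := by
          apply pv_tw_stop
          rcases List.any_eq_true.mp hany with ⟨x, hx, hpx⟩
          exact ⟨x, List.mem_reverse.mpr hx, by simp [pvP, hpx]⟩
        obtain ⟨a1, a2⟩ := acc
        cases a1 <;> simp [pvStep, hal, pvP, hstop] <;> omega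
      · rw [if_neg hany, if_pos (by simp [hal])]
        have hall : (t.reverse ++ [c]).takeWhile pvP = t.reverse := by
          rw [List.takeWhile_append, if_pos (by
            rw [List.takeWhile_eq_self_iff.mpr]
            intro x hx
            simp only [List.any_eq_true, not_exists, not_and] at hany
            simp [pvP, hany x (List.mem_reverse.mp hx)])]
          simp [pvP, hal]
        obtain ⟨a1, a2⟩ := acc
        cases a1 <;> simp [pvStep, hal, pvP, hall]
    · rw [show pvStep acc (k, c) = acc from by simp [pvStep, hal]]
      by_cases hany : t.any PySem.Chars.isalnum
      · rw [if_pos hany, if_pos (by simp [hany])]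
        have hstop : ((t.reverse ++ [c]).takeWhile pvP) = t.reverse.takeWhile pvP := by
          apply pv_tw_stop
          rcases List.any_eq_true.mp hany with ⟨x, hx, hpx⟩
          exact ⟨x, List.mem_reverse.mpr hx, by simp [pvP, hpx]⟩
        obtain ⟨a1, a2⟩ := acc
        cases a1 <;> simp [hal, pvP, hstop] <;> omega
      · rw [if_neg hany, if_neg (by simp [hany, hal])]

theorem pv_main (beseda : String) : izloci_besedo beseda = izloci_besedo_alt beseda := by
  simp only [izloci_besedo, izloci_besedo_alt]
  set cs := beseda.toList with hcs
  have hL : pvScan cs (PySem.List.pyRange 0 (cs.length : Int) 1) = (cs.takeWhile pvP).length := by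
    have := pvScan_left cs []
    simpa using this
  have hR : pvScan cs (PySem.List.pyRange ((cs.length : Int) - 1) 0 (-1))
      = (cs.tail.reverse.takeWhile pvP).length := by
    have := pvScan_right cs []
    simpa using this
  rw [pvFold]
  by_cases hany : cs.any PySem.Chars.isalnum
  · rw [if_pos hany]
    -- cs is nonempty
    rcases cs with _ | ⟨c, t⟩
    · simp at hany
    have hd : ((c :: t).tail.reverse.takeWhile pvP).length
        = (((c :: t).reverse.takeWhile pvP).length) := by
      by_cases ht : t.any PySem.Chars.isalnum
      · have hstop : ((t.reverse ++ [c]).takeWhile pvP) = t.reverse.takeWhile pvP := by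
          apply pv_tw_stop
          rcases List.any_eq_true.mp ht with ⟨x, hx, hpx⟩
          exact ⟨x, List.mem_reverse.mpr hx, by simp [pvP, hpx]⟩
        simp [hstop]
      · have hal : PySem.Chars.isalnum c := by
          rcases List.any_eq_true.mp hany with ⟨x, hx, hpx⟩
          rcases List.mem_cons.mp hx with h | h
          · exact h ▸ hpx
          · exact absurd (List.any_eq_true.mpr ⟨x, h, hpx⟩) (by simp [ht])
        have hall : (t.reverse ++ [c]).takeWhile pvP = t.reverse := by
          rw [List.takeWhile_append, if_pos (by
            rw [List.takeWhile_eq_self_iff.mpr]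
            intro x hx
            simp only [List.any_eq_true, not_exists, not_and] at ht
            simp [pvP, ht x (List.mem_reverse.mp hx)])]
          simp [pvP, hal]
        have hfull2 : t.reverse.takeWhile pvP = t.reverse := by
          rw [List.takeWhile_eq_self_iff.mpr]
          intro x hx
          simp only [List.any_eq_true, not_exists, not_and] at ht
          simp [pvP, ht x (List.mem_reverse.mp hx)]
        simp [hall, hfull2]
    simp only
    rw [hL, hR, hd]
    have harg1 : (0 : Int) + ((List.takeWhile pvP (c :: t)).length : Int)
        = ((List.takeWhile pvP (c :: t)).length : Int) := by omega
    have harg2 : (0 : Int) + (((c :: t).length : Int) - 1 - ((List.takeWhile pvP (c :: t).reverse).length : Int)) + 1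
        = ((c :: t).length : Int) - ((List.takeWhile pvP (c :: t).reverse).length : Int) := by omega
    rw [harg1, harg2]
  · rw [if_neg hany]
    simp only
    rw [hL]
    have hfull : cs.takeWhile pvP = cs := by
      rw [List.takeWhile_eq_self_iff.mpr]
      intro x hx
      simp only [List.any_eq_true, not_exists, not_and] at hany
      simp [pvP, hany x hx]
    rw [hfull]
    have hnil : PySem.List.slice cs (some (cs.length : Int))
        (some ((cs.length : Int) - (pvScan cs (PySem.List.pyRange ((cs.length : Int) - 1) 0 (-1)) : Int))) = [] := by
      apply List.eq_nil_of_length_eq_zero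
      rw [PySem.List.length_slice]
      have h1 := PySem.List.clampIdx_le cs.length ((cs.length : Int) - (pvScan cs (PySem.List.pyRange ((cs.length : Int) - 1) 0 (-1)) : Int))
      have h2 : PySem.List.clampIdx cs.length ((cs.length : Int)) = cs.length := by
        simp
      omega
    rw [hnil]

-- ===== VERDICT (by name: the statement is the Claim_ definition above) =====
theorem izloci_besedo_spec : Claim_equal_izloci_besedo := by
  intro beseda _
  unfold Spec_izloci_besedo
  exact pv_main beseda
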